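-- pv_equiv track=rewrite | github.com/GundalaNikhil/DSA | dsa-problems/Hashing/testcases/tc_generator/generate_hashing_014_to_016.py | solve_hsh016
-- ===== SOURCE A (Python) =====
-- from typing import List, Dict, Any
--
-- def solve_hsh016(words: List[str]) -> int:
--     """
--     Count connected components of near-anagram groups
--     Two words are near-anagrams if removing one char from each makes them anagrams
--     """
--     if not words:
--         return 0
--
--     # Union-Find
--     parent = list(range(len(words)))
--
--     def find(x):
--         if parent[x] != x:
--             parent[x] = find(parent[x])
--         return parent[x]
--
--     def union(x, y):
--         px, py = find(x), find(y)
--         if px != py: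
--             parent[px] = py
--
--     def are_near_anagrams(w1: str, w2: str) -> bool:
--         """Check if w1 and w2 are near-anagrams"""
--         # Try removing each character from w1
--         for i in range(len(w1)):
--             reduced_w1 = w1[:i] + w1[i+1:]
--             # Try removing each character from w2
--             for j in range(len(w2)):
--                 reduced_w2 = w2[:j] + w2[j+1:]
--                 # Check if anagrams
--                 if sorted(reduced_w1) == sorted(reduced_w2):
--                     return True
--         return False
--
--     # Check all pairs
--     for i in range(len(words)):
--         for j in range(i + 1, len(words)):
--             if are_near_anagrams(words[i], words[j]):
--                 union(i, j)
--
--     # Count components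
--     return len(set(find(i) for i in range(len(words))))
-- ===== SOURCE B (Python) =====
-- from typing import List
--
-- def solve_hsh016(words: List[str]) -> int:
--     n = len(words)
--     # One pass: each word's set of sorted remove-one-char signatures, computed once.
--     sigs = [{''.join(sorted(w[:i] + w[i+1:])) for i in range(len(w))} for w in words]
--     # Edge list: index pairs whose signature sets intersect.
--     edges = [(i, j) for i in range(n) for j in range(i + 1, n)
--              if not sigs[i].isdisjoint(sigs[j])]
--     # Dict-based union-find (sparse: only touched indices are stored).
--     parent = {}
--
--     def find(x):
--         if parent.get(x, x) == x:
--             return x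
--         r = find(parent[x])
--         parent[x] = r
--         return r
--
--     for i, j in edges:
--         ri = find(i)
--         rj = find(j)
--         if ri != rj:
--             parent[ri] = rj
--
--     return len({find(i) for i in range(n)})
-- ===== Notes on version B (the rewrite author's own statement) =====
-- stated objective: faster
-- what changed: B precomputes each word's set of sorted remove-one-char signatures once, materialises an explicit edge list of index pairs whose signature sets intersect, and runs a sparse dict-based union-find over that edge list, instead of A's dense list-based union-find driven by a nested pair loop that re-slices and re-sorts both words for every removal pair of every word pair.
import Mathlib
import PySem

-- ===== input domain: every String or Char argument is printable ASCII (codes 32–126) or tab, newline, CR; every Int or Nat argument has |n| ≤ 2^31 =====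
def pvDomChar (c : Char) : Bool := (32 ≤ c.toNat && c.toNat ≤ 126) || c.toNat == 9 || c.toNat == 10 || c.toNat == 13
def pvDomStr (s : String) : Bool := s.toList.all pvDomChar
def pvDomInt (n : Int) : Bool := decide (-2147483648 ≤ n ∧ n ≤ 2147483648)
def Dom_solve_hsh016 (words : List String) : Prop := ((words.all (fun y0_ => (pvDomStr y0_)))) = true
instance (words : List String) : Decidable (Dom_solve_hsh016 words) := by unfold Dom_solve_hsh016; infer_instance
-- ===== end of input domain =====

-- B is faster: it precomputes each word's set of sorted remove-one-char signatures once, builds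
-- an explicit edge list of index pairs with intersecting signature sets, and runs a sparse
-- dict-based union-find over that list — instead of A's re-slicing and re-sorting both words
-- for every removal pair inside every word pair over a dense list-based union-find.

-- ===== PORT A =====
-- Union-Find `find` with path compression, threading the parent list; the fuel argument only
-- makes the recursion total (Python's recursion terminates since parent chains are acyclic;
-- fuel = length of the parent list always suffices, so behaviour is exact).
def pvFind (fuel : Nat) (parent : List Nat) (x : Nat) : Nat × List Nat :=
  match fuel with
  | 0 => (x, parent)
  | fuel + 1 =>
    let p := parent.getD x x
    if p ≠ x then
      let rp := pvFind fuel parent p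
      (rp.1, rp.2.set x rp.1)
    else
      (x, parent)

def pvUnion (parent : List Nat) (x y : Nat) : List Nat :=
  let r1 := pvFind parent.length parent x
  let r2 := pvFind r1.2.length r1.2 y
  if r1.1 ≠ r2.1 then r2.2.set r1.1 r2.1 else r2.2

-- are_near_anagrams: slices w[:i] + w[i+1:] with 0 ≤ i < len(w) are exactly take/drop (exact here)
def pvNear (w1 w2 : String) : Bool :=
  (List.range w1.toList.length).any (fun i =>
    let r1 := w1.toList.take i ++ w1.toList.drop (i+1)
    (List.range w2.toList.length).any (fun j =>
      let r2 := w2.toList.take j ++ w2.toList.drop (j+1)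
      PySem.List.sorted r1 (fun c => c) false == PySem.List.sorted r2 (fun c => c) false))

-- final 'len(set(find(i) for i in range(n)))': the generator threads the (compressed) parent
def pvCount (n : Nat) (parent : List Nat) : Int :=
  let fin := (List.range n).foldl (fun (acc : List Nat × List Nat) i =>
      let rp := pvFind acc.2.length acc.2 i
      (acc.1 ++ [rp.1], rp.2)) ([], parent)
  ((PySem.Set.ofList fin.1).length : Int)

def solve_hsh016 (words : List String) : Int :=
  if words.isEmpty then 0
  else
    let n := words.length
    let parent := (List.range n).foldl (fun par i =>
        (List.range' (i + 1) (n - (i + 1))).foldl (fun par j =>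
          if pvNear (words.getD i "") (words.getD j "") then pvUnion par i j else par) par)
      (List.range n)
    pvCount n parent

-- ===== PORT B =====
-- {''.join(sorted(w[:i]+w[i+1:])) for i in range(len(w))}: a signature string is represented by
-- its character list (''.join on a char list is a bijection, so set membership is exact)
def bSig (w : String) : PySem.Set (List Char) :=
  PySem.Set.ofList ((List.range w.toList.length).map (fun k =>
    PySem.List.sorted (w.toList.take k ++ w.toList.drop (k+1)) (fun c => c) false))

-- the edge-list comprehension [(i, j) for i ... for j ... if not sigs[i].isdisjoint(sigs[j])]
def bEdges (sz : Nat) (tbl : List (PySem.Set (List Char))) : List (Nat × Nat) :=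
  (List.range sz).flatMap (fun a =>
    ((List.range' (a + 1) (sz - (a + 1))).filter (fun b =>
      !PySem.Set.isdisjoint (tbl.getD a []) (tbl.getD b []))).map (fun b => (a, b)))

-- recursive find over the sparse dict parent (parent.get(x, x)); gas only for totality:
-- Python's recursion terminates (acyclic parent chains, length < number of words), so
-- gas = number of words always suffices and behaviour is exact
def bFind (gas : Nat) (pmap : PySem.Dict Nat Nat) (v : Nat) : Nat × PySem.Dict Nat Nat :=
  match gas with
  | 0 => (v, pmap)
  | gas + 1 =>
    if pmap.getD v v == v then (v, pmap)
    else
      let res := bFind gas pmap (pmap.getD v v)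
      (res.1, res.2.insert v res.1)

def solve_hsh016_alt (words : List String) : Int :=
  let sz := words.length
  let tbl := words.map bSig
  let dsu := (bEdges sz tbl).foldl (fun pm pq =>
      let ra := bFind sz pm pq.1
      let rb := bFind sz ra.2 pq.2
      if ra.1 ≠ rb.1 then rb.2.insert ra.1 rb.1 else rb.2) PySem.Dict.empty
  let comps := (List.range sz).foldl (fun (st : PySem.Set Nat × PySem.Dict Nat Nat) k =>
      let rt := bFind sz st.2 k
      (PySem.Set.add st.1 rt.1, rt.2)) (PySem.Set.empty, dsu)
  ((comps.1.length : Int))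

-- ===== PRECONDITION & SPEC =====
def Spec_solve_hsh016 (words : List String) (out : Int) : Prop := out = solve_hsh016_alt words
instance (words : List String) (out : Int) : Decidable (Spec_solve_hsh016 words out) := by unfold Spec_solve_hsh016; infer_instance

-- ===== CLAIM (what is proved, stated in full; the proofs are below) =====
def Claim_equal_solve_hsh016 : Prop := ∀ (words : List String), Dom_solve_hsh016 words → Spec_solve_hsh016 words (solve_hsh016 words)

-- ===== LEMMAS AND PROOFS =====

-- the simulation relation between A's dense parent list and B's sparse parent dict
def pvRel (n : Nat) (l : List Nat) (d : PySem.Dict Nat Nat) : Prop :=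
  l.length = n ∧ ∀ x < n, d.getD x x = l.getD x x ∧ l.getD x x < n

lemma pvRel_write {n : Nat} {l : List Nat} {d : PySem.Dict Nat Nat} (h : pvRel n l d)
    {a b : Nat} (hb : b < n) : pvRel n (l.set a b) (d.insert a b) := by
  obtain ⟨hlen, hp⟩ := h
  refine ⟨by simpa using hlen, fun y hy => ?_⟩
  by_cases hxy : y = a
  · subst hxy
    have hyl : y < l.length := hlen ▸ hy
    constructor
    · rw [PySem.Dict.getD_insert_self]
      rw [List.getD_eq_getElem?_getD, List.getElem?_set_self hyl]
      rfl
    · rw [List.getD_eq_getElem?_getD, List.getElem?_set_self hyl]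
      simpa using hb
  · have hl : (l.set a b).getD y y = l.getD y y := by
      rw [List.getD_eq_getElem?_getD, List.getElem?_set_ne (fun h => hxy h.symm),
        ← List.getD_eq_getElem?_getD]
    rw [hl, PySem.Dict.getD_insert, if_neg hxy]
    exact hp y hy

lemma find_rel {n : Nat} (fuel : Nat) {l : List Nat} {d : PySem.Dict Nat Nat}
    (h : pvRel n l d) {x : Nat} (hx : x < n) :
    (pvFind fuel l x).1 = (bFind fuel d x).1 ∧ pvRel n (pvFind fuel l x).2 (bFind fuel d x).2 ∧
      (pvFind fuel l x).1 < n := by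
  induction fuel generalizing l d x with
  | zero => exact ⟨rfl, h, hx⟩
  | succ fuel ih =>
    have hpt := h.2 x hx
    simp only [pvFind, bFind, hpt.1]
    by_cases heq : l.getD x x = x
    · rw [if_neg (by simp [← List.getD_eq_getElem?_getD, heq]), if_pos (by simp [← List.getD_eq_getElem?_getD, heq])]
      exact ⟨rfl, h, hx⟩
    · rw [if_pos heq, if_neg (by simp [← List.getD_eq_getElem?_getD, heq])]
      obtain ⟨h1, h2, h3⟩ := ih h hpt.2
      refine ⟨h1, ?_, h3⟩
      rw [← h1]
      exact pvRel_write h2 h3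

-- one union step of A = one edge step of B, under the simulation relation
lemma union_rel {n : Nat} {l : List Nat} {d : PySem.Dict Nat Nat} (h : pvRel n l d)
    {i j : Nat} (hi : i < n) (hj : j < n) :
    pvRel n (pvUnion l i j)
      (let f1 := bFind n d i
       let f2 := bFind n f1.2 j
       if f1.1 ≠ f2.1 then f2.2.insert f1.1 f2.1 else f2.2) := by
  unfold pvUnion
  obtain ⟨e1, r1, b1⟩ := find_rel n h hi
  rw [h.1]
  dsimp only
  rw [show (pvFind n l i).2.length = n from r1.1]
  obtain ⟨e2, r2, b2⟩ := find_rel n r1 hj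
  rw [e1, e2] at *
  split_ifs with hc
  · exact pvRel_write r2 b2
  · exact r2

-- A's pair-loop body over an inner range equals B's step folded over the filtered, mapped range
lemma inner_fold {σ : Type} (g : σ → Nat → Nat → σ) (P : Nat → Nat → Bool) (i : Nat) :
    ∀ (l : List Nat) (s : σ),
      l.foldl (fun s j => if P i j then g s i j else s) s
        = ((l.filter (P i)).map (fun j => (i, j))).foldl (fun s e => g s e.1 e.2) s := by
  intro l
  induction l with
  | nil => intro s; rfl
  | cons a t ih =>
    intro s
    by_cases hp : P i a
    · simp [hp, ih]
    · simp [hp, ih]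

lemma foldl_flatMap {α β σ : Type} (f : α → List β) (h : σ → β → σ) :
    ∀ (L : List α) (s : σ), (L.flatMap f).foldl h s = L.foldl (fun s a => (f a).foldl h s) s := by
  intro L
  induction L with
  | nil => intro s; rfl
  | cons a t ih => intro s; simp [List.flatMap_cons, List.foldl_append, ih]

-- the pair predicates agree: w1 and w2 are near-anagrams iff their signature sets intersect
lemma near_eq_not_isdisjoint (w1 w2 : String) :
    pvNear w1 w2 = !PySem.Set.isdisjoint (bSig w1) (bSig w2) := by
  rw [Bool.eq_iff_iff]
  simp only [Bool.not_eq_true', pvNear, List.any_eq_true, List.mem_range, beq_iff_eq]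
  have hmem : ∀ (w : String) (x : List Char), x ∈ bSig w ↔ ∃ i < w.toList.length,
      x = PySem.List.sorted (w.toList.take i ++ w.toList.drop (i+1)) (fun c => c) false := by
    intro w x
    simp [bSig, PySem.Set.mem_ofList, List.mem_map, eq_comm]
  constructor
  · rintro ⟨i, hi, j, hj, hEq⟩
    rw [Bool.eq_false_iff]
    intro hdis
    have h := (PySem.Set.isdisjoint_iff _ _).mp hdis
      (PySem.List.sorted (w1.toList.take i ++ w1.toList.drop (i+1)) (fun c => c) false)
      ((hmem w1 _).mpr ⟨i, hi, rfl⟩)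
    exact h ((hmem w2 _).mpr ⟨j, hj, hEq⟩)
  · intro hdis
    have hne : ¬ ∀ x ∈ bSig w1, x ∉ bSig w2 := fun hall =>
      (Bool.eq_false_iff.mp hdis) ((PySem.Set.isdisjoint_iff _ _).mpr hall)
    rcases not_forall.mp hne with ⟨x, hx⟩
    rcases Classical.not_imp.mp hx with ⟨hx1, hx2⟩
    rcases (hmem w1 x).mp hx1 with ⟨i, hi, he1⟩
    rcases (hmem w2 x).mp (not_not.mp hx2) with ⟨j, hj, he2⟩
    exact ⟨i, hi, j, hj, he1.symm.trans he2⟩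

lemma getD_map_bSig (words : List String) (i : Nat) :
    (words.map bSig).getD i [] = bSig (words.getD i "") := by
  by_cases h : i < words.length
  · rw [List.getD_eq_getElem?_getD, List.getD_eq_getElem?_getD, List.getElem?_map,
      List.getElem?_eq_getElem h]
    simp
  · rw [List.getD_eq_default _ _ (by simpa using Nat.le_of_not_lt h),
      List.getD_eq_default _ _ (Nat.le_of_not_lt h)]
    rfl

-- A's nested pair loop, rewritten as B's fold over the explicit edge list
lemma loop_as_edges (words : List String) (init : List Nat) :
    (List.range words.length).foldl (fun par i =>
        (List.range' (i + 1) (words.length - (i + 1))).foldl (fun par j =>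
          if pvNear (words.getD i "") (words.getD j "") then pvUnion par i j else par) par) init
      = (bEdges words.length (words.map bSig)).foldl (fun par e => pvUnion par e.1 e.2) init := by
  have hfun : ∀ i j, pvNear (words.getD i "") (words.getD j "")
      = !PySem.Set.isdisjoint ((words.map bSig).getD i []) ((words.map bSig).getD j []) := by
    intro i j
    rw [near_eq_not_isdisjoint, getD_map_bSig, getD_map_bSig]
  simp only [hfun]
  unfold bEdges
  rw [foldl_flatMap]
  congr 1
  funext s i
  exact inner_fold pvUnion
    (fun i j => !PySem.Set.isdisjoint ((words.map bSig).getD i []) ((words.map bSig).getD j [])) i _ s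

lemma edges_bounded (n : Nat) (sigs : List (PySem.Set (List Char))) :
    ∀ e ∈ bEdges n sigs, e.1 < n ∧ e.2 < n := by
  intro e he
  unfold bEdges at he
  simp only [List.mem_flatMap, List.mem_map, List.mem_filter, List.mem_range,
    List.mem_range'_1] at he
  obtain ⟨i, hi, j, ⟨⟨hj1, hj2⟩, _⟩, rfl⟩ := he
  refine ⟨hi, ?_⟩
  omega

lemma loop_rel {n : Nat} :
    ∀ (E : List (Nat × Nat)) {l : List Nat} {d : PySem.Dict Nat Nat},
      (∀ e ∈ E, e.1 < n ∧ e.2 < n) → pvRel n l d →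
      pvRel n (E.foldl (fun par e => pvUnion par e.1 e.2) l)
        (E.foldl (fun d e =>
          let f1 := bFind n d e.1
          let f2 := bFind n f1.2 e.2
          if f1.1 ≠ f2.1 then f2.2.insert f1.1 f2.1 else f2.2) d) := by
  intro E
  induction E with
  | nil => intro l d _ h; exact h
  | cons e t ih =>
    intro l d hb h
    exact ih (fun e' he' => hb e' (List.mem_cons_of_mem _ he'))
      (union_rel h (hb e List.mem_cons_self).1 (hb e List.mem_cons_self).2)

lemma count_rel {n : Nat} :
    ∀ (L : List Nat) (acc : List Nat) {l : List Nat} {d : PySem.Dict Nat Nat},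
      (∀ x ∈ L, x < n) → pvRel n l d →
      PySem.Set.ofList (L.foldl (fun (acc : List Nat × List Nat) i =>
          let rp := pvFind acc.2.length acc.2 i
          (acc.1 ++ [rp.1], rp.2)) (acc, l)).1
        = (L.foldl (fun (acc : PySem.Set Nat × PySem.Dict Nat Nat) i =>
            let r := bFind n acc.2 i
            (PySem.Set.add acc.1 r.1, r.2)) (PySem.Set.ofList acc, d)).1 := by
  intro L
  induction L with
  | nil => intro acc l d _ _; simp
  | cons a t ih =>
    intro acc l d hb h
    obtain ⟨e1, r1, _⟩ := find_rel n h (hb a List.mem_cons_self)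
    simp only [List.foldl_cons, h.1]
    have := ih (acc ++ [(pvFind n l a).1]) (fun x hx => hb x (List.mem_cons_of_mem _ hx)) r1
    rw [PySem.Set.ofList_append_singleton] at this
    rw [← e1]
    exact this

-- initial states are related
lemma rel_init (n : Nat) : pvRel n (List.range n) PySem.Dict.empty := by
  refine ⟨List.length_range, fun x hx => ?_⟩
  have hr : (List.range n).getD x x = x := by
    rw [List.getD_eq_getElem?_getD, List.getElem?_range hx]; rfl
  rw [hr, PySem.Dict.getD_empty]
  exact ⟨rfl, hx⟩

-- ===== VERDICT (by name: the statement is the Claim_ definition above) =====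
theorem solve_hsh016_spec : Claim_equal_solve_hsh016 := by
  intro words _
  unfold Spec_solve_hsh016 solve_hsh016 solve_hsh016_alt
  by_cases hemp : words.isEmpty
  · have h0 : words.length = 0 := List.isEmpty_iff_length_eq_zero.mp hemp
    simp [hemp, h0, bEdges]
  · simp only [if_neg hemp]
    rw [loop_as_edges]
    have hrel := loop_rel (bEdges words.length (words.map bSig))
      (edges_bounded _ _) (rel_init words.length)
    unfold pvCount
    have hcnt := count_rel (n := words.length) (List.range words.length) []
      (fun x hx => List.mem_range.mp hx) hrel
    exact congrArg (fun m : Nat => (m : Int)) (congrArg List.length hcnt)
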